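-- pv_equiv track=rewrite | github.com/JonasRigo/qs-snapshots-fidelity | generate_samples.py | lattice_edges_rect
-- ===== SOURCE A (Python) =====
-- from typing import List, Tuple, Optional
--
-- def lattice_edges_rect(
--     Lx: int,
--     Ly: int,
--     pbcx: bool = False,
--     pbcy: bool = False,
-- ) -> List[Tuple[int, int]]:
--     """
--     Return undirected nearest-neighbor edges (i, j) with i < j
--     for a rectangular Lx x Ly lattice mapped to 1D indices:
--         idx(x, y) = x + Lx*y
--     """
--     def idx(x: int, y: int) -> int:
--         return x + Lx * y
--
--     edges = set()
--
--     for y in range(Ly):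
--         for x in range(Lx):
--             i = idx(x, y)
--
--             # +x neighbor
--             if x + 1 < Lx:
--                 j = idx(x + 1, y)
--                 edges.add((min(i, j), max(i, j)))
--             elif pbcx and Lx > 1:
--                 j = idx(0, y)
--                 edges.add((min(i, j), max(i, j)))
--
--             # +y neighbor
--             if y + 1 < Ly:
--                 j = idx(x, y + 1)
--                 edges.add((min(i, j), max(i, j)))
--             elif pbcy and Ly > 1:
--                 j = idx(x, 0)
--                 edges.add((min(i, j), max(i, j)))
--
--     return sorted(edges)
-- ===== SOURCE B (Python) =====
-- from typing import List, Tuple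
--
-- def lattice_edges_rect(
--     Lx: int,
--     Ly: int,
--     pbcx: bool = False,
--     pbcy: bool = False,
-- ) -> List[Tuple[int, int]]:
--     # Emit edges directly in lexicographic order: scan flat sites i ascending
--     # and, for each, list its larger partners in ascending order.
--     if Lx <= 0 or Ly <= 0:
--         return []
--     edges = []
--     for i in range(Lx * Ly):
--         x = i % Lx
--         y = i // Lx
--         if x + 1 < Lx:
--             edges.append((i, i + 1))
--         if x == 0 and pbcx and Lx > 2:
--             edges.append((i, i + Lx - 1))
--         if y + 1 < Ly:
--             edges.append((i, i + Lx))
--         if y == 0 and pbcy and Ly > 2: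
--             edges.append((i, i + Lx * (Ly - 1)))
--     return edges
-- ===== Notes on version B (the rewrite author's own statement) =====
-- stated objective: faster
-- what changed: A inserts min/max-normalized edges from a nested (x,y) scan into a set and sorts it at the end; B scans flat site indices once and emits each site's larger neighbors in ascending order, producing the sorted deduplicated edge list directly with no set and no sort.
import Mathlib
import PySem

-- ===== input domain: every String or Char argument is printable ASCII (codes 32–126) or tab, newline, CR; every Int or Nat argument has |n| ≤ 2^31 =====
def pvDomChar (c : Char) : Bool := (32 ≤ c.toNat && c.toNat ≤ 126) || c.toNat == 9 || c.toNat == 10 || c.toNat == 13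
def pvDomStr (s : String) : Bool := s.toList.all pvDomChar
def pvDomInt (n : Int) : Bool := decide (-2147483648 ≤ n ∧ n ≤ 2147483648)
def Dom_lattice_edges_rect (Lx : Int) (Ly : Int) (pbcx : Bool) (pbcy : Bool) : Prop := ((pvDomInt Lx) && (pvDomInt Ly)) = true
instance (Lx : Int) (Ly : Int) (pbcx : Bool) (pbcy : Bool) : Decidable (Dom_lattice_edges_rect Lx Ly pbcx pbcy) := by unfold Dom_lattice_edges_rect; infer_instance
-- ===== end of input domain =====

-- B replaces "set of min/max-normalized edges from a nested (x,y) scan, then sort" by a single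
-- flat-index scan that emits each site's larger partners in ascending order, producing the sorted
-- deduplicated edge list directly (no set, no sort).

-- ===== PORT A =====
-- Python's sorted() on int pairs is lexicographic; `toLex` equips the pairs with exactly that order.
def lattice_edges_rect (Lx : Int) (Ly : Int) (pbcx : Bool) (pbcy : Bool) : List (Int × Int) :=
  PySem.List.sorted
    ((PySem.List.pyRange 0 Ly 1).foldl (fun edges y =>
      (PySem.List.pyRange 0 Lx 1).foldl (fun edges x =>
        let edges1 :=
          if x + 1 < Lx then
            PySem.Set.add edges (min (x + Lx * y) (x + 1 + Lx * y), max (x + Lx * y) (x + 1 + Lx * y))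
          else if pbcx && decide (Lx > 1) then
            PySem.Set.add edges (min (x + Lx * y) (0 + Lx * y), max (x + Lx * y) (0 + Lx * y))
          else edges
        if y + 1 < Ly then
          PySem.Set.add edges1 (min (x + Lx * y) (x + Lx * (y + 1)), max (x + Lx * y) (x + Lx * (y + 1)))
        else if pbcy && decide (Ly > 1) then
          PySem.Set.add edges1 (min (x + Lx * y) (x + Lx * 0), max (x + Lx * y) (x + Lx * 0))
        else edges1) edges) PySem.Set.empty)
    (fun e => toLex e) false

-- ===== PORT B =====
def lattice_edges_rect_alt (Lx : Int) (Ly : Int) (pbcx : Bool) (pbcy : Bool) : List (Int × Int) :=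
  if Lx ≤ 0 ∨ Ly ≤ 0 then []
  else
    (PySem.List.pyRange 0 (Lx * Ly) 1).foldl (fun edges i =>
      let x := PySem.Int.mod i Lx
      let y := PySem.Int.floordiv i Lx
      let edges1 := if x + 1 < Lx then edges ++ [(i, i + 1)] else edges
      let edges2 := if (x == 0) && pbcx && decide (Lx > 2) then edges1 ++ [(i, i + Lx - 1)] else edges1
      let edges3 := if y + 1 < Ly then edges2 ++ [(i, i + Lx)] else edges2
      if (y == 0) && pbcy && decide (Ly > 2) then edges3 ++ [(i, i + Lx * (Ly - 1))] else edges3) []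

-- ===== PRECONDITION & SPEC =====
def Spec_lattice_edges_rect (Lx : Int) (Ly : Int) (pbcx : Bool) (pbcy : Bool) (out : List (Int × Int)) : Prop := out = lattice_edges_rect_alt Lx Ly pbcx pbcy
instance (Lx : Int) (Ly : Int) (pbcx : Bool) (pbcy : Bool) (out : List (Int × Int)) : Decidable (Spec_lattice_edges_rect Lx Ly pbcx pbcy out) := by unfold Spec_lattice_edges_rect; infer_instance

-- ===== CLAIM (what is proved, stated in full; the proofs are below) =====
def Claim_equal_lattice_edges_rect : Prop := ∀ (Lx : Int) (Ly : Int) (pbcx : Bool) (pbcy : Bool), Dom_lattice_edges_rect Lx Ly pbcx pbcy → Spec_lattice_edges_rect Lx Ly pbcx pbcy (lattice_edges_rect Lx Ly pbcx pbcy)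

-- ===== LEMMAS AND PROOFS =====

-- The body of A's inner loop, by name (definitionally the same function as in the port).
def stepA (Lx Ly : Int) (pbcx pbcy : Bool) (y : Int) (edges : PySem.Set (Int × Int)) (x : Int) : PySem.Set (Int × Int) :=
  let edges1 :=
    if x + 1 < Lx then
      PySem.Set.add edges (min (x + Lx * y) (x + 1 + Lx * y), max (x + Lx * y) (x + 1 + Lx * y))
    else if pbcx && decide (Lx > 1) then
      PySem.Set.add edges (min (x + Lx * y) (0 + Lx * y), max (x + Lx * y) (0 + Lx * y))
    else edges
  if y + 1 < Ly then
    PySem.Set.add edges1 (min (x + Lx * y) (x + Lx * (y + 1)), max (x + Lx * y) (x + Lx * (y + 1)))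
  else if pbcy && decide (Ly > 1) then
    PySem.Set.add edges1 (min (x + Lx * y) (x + Lx * 0), max (x + Lx * y) (x + Lx * 0))
  else edges1

def edgesA (Lx Ly : Int) (pbcx pbcy : Bool) : PySem.Set (Int × Int) :=
  (PySem.List.pyRange 0 Ly 1).foldl (fun edges y =>
    (PySem.List.pyRange 0 Lx 1).foldl (stepA Lx Ly pbcx pbcy y) edges) PySem.Set.empty

theorem portA_eq (Lx Ly : Int) (pbcx pbcy : Bool) :
    lattice_edges_rect Lx Ly pbcx pbcy
      = PySem.List.sorted (edgesA Lx Ly pbcx pbcy) (fun e => toLex e) false := rfl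

-- The edges A's loop body contributes at cell (x, y) (min/max already resolved for 0 ≤ x, 0 ≤ y).
def cellA (Lx Ly : Int) (pbcx pbcy : Bool) (x y : Int) : List (Int × Int) :=
  (if x + 1 < Lx then [(x + Lx * y, x + 1 + Lx * y)]
   else if pbcx && decide (Lx > 1) then [(0 + Lx * y, x + Lx * y)] else [])
  ++
  (if y + 1 < Ly then [(x + Lx * y, x + Lx * (y + 1))]
   else if pbcy && decide (Ly > 1) then [(x + Lx * 0, x + Lx * y)] else [])

-- The edges B's loop body appends at flat site i.
def cellB (Lx Ly : Int) (pbcx pbcy : Bool) (i : Int) : List (Int × Int) :=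
  (if i % Lx + 1 < Lx then [(i, i + 1)] else [])
  ++ (if (i % Lx == 0) && pbcx && decide (Lx > 2) then [(i, i + Lx - 1)] else [])
  ++ (if i / Lx + 1 < Ly then [(i, i + Lx)] else [])
  ++ (if (i / Lx == 0) && pbcy && decide (Ly > 2) then [(i, i + Lx * (Ly - 1))] else [])

theorem foldl_mem_iff {β γ : Type} [BEq γ] [LawfulBEq γ] {l : List β}
    (f : PySem.Set γ → β → PySem.Set γ) (g : β → List γ)
    (h : ∀ b ∈ l, ∀ (s : PySem.Set γ) (e : γ), e ∈ f s b ↔ e ∈ s ∨ e ∈ g b)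
    (s : PySem.Set γ) (e : γ) :
    e ∈ l.foldl f s ↔ e ∈ s ∨ ∃ b ∈ l, e ∈ g b := by
  induction l generalizing s with
  | nil => simp
  | cons b l ih =>
    simp only [List.foldl_cons]
    rw [ih (fun b hb => h b (List.mem_cons_of_mem _ hb)), h b (List.mem_cons_self)]
    simp only [List.mem_cons, exists_eq_or_imp]
    tauto

theorem foldl_nodup {β γ : Type} (f : List γ → β → List γ)
    (h : ∀ (s : List γ) (b : β), s.Nodup → (f s b).Nodup) :
    ∀ (l : List β) (s : List γ), s.Nodup → (l.foldl f s).Nodup := by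
  intro l
  induction l with
  | nil => intro s hs; simpa using hs
  | cons b l ih => intro s hs; simpa using ih _ (h s b hs)

theorem mem_stepA {Lx Ly : Int} {pbcx pbcy : Bool} {x y : Int}
    (hx0 : 0 ≤ x) (hxL : x < Lx) (hy0 : 0 ≤ y) (s : PySem.Set (Int × Int)) (e : Int × Int) :
    e ∈ stepA Lx Ly pbcx pbcy y s x ↔ e ∈ s ∨ e ∈ cellA Lx Ly pbcx pbcy x y := by
  have hLx0 : (0 : Int) ≤ Lx := by linarith
  have hp0 : Lx * 0 ≤ Lx * y := mul_le_mul_of_nonneg_left hy0 hLx0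
  have hp1 : Lx * y ≤ Lx * (y + 1) := mul_le_mul_of_nonneg_left (by linarith) hLx0
  have h2 : min (x + Lx * y) (Lx * y) = Lx * y := min_eq_right (by linarith)
  have h2' : max (x + Lx * y) (Lx * y) = x + Lx * y := max_eq_left (by linarith)
  have h3 : min (x + Lx * y) (x + Lx * (y + 1)) = x + Lx * y := min_eq_left (by linarith)
  have h3' : max (x + Lx * y) (x + Lx * (y + 1)) = x + Lx * (y + 1) := max_eq_right (by linarith)
  have h4 : min (x + Lx * y) x = x := min_eq_right (by linarith)
  have h4' : max (x + Lx * y) x = x + Lx * y := max_eq_left (by linarith)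
  unfold stepA cellA
  split_ifs <;>
    simp [PySem.Set.mem_add, h2, h2', h3, h3', h4, h4'] <;> tauto

theorem mem_edgesA (Lx Ly : Int) (pbcx pbcy : Bool) (e : Int × Int) :
    e ∈ edgesA Lx Ly pbcx pbcy ↔
      ∃ y ∈ PySem.List.pyRange 0 Ly 1, ∃ x ∈ PySem.List.pyRange 0 Lx 1,
        e ∈ cellA Lx Ly pbcx pbcy x y := by
  unfold edgesA
  rw [foldl_mem_iff _ (fun y => (PySem.List.pyRange 0 Lx 1).flatMap (fun x => cellA Lx Ly pbcx pbcy x y)) ?_]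
  · simp [List.mem_flatMap, PySem.Set.empty]
  · intro y hy s e
    rw [foldl_mem_iff _ (fun x => cellA Lx Ly pbcx pbcy x y) ?_]
    · simp [List.mem_flatMap]
    · intro x hx s e
      have hy' := PySem.List.mem_pyRange_one.mp hy
      have hx' := PySem.List.mem_pyRange_one.mp hx
      exact mem_stepA hx'.1 hx'.2 hy'.1 s e

theorem nodup_edgesA (Lx Ly : Int) (pbcx pbcy : Bool) : (edgesA Lx Ly pbcx pbcy).Nodup := by
  unfold edgesA
  apply foldl_nodup
  · intro s y hs
    apply foldl_nodup
    · intro s x hs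
      unfold stepA
      split_ifs <;> first
        | exact PySem.Set.nodup_add _ _ hs
        | exact PySem.Set.nodup_add _ _ (PySem.Set.nodup_add _ _ hs)
        | exact hs
    · exact hs
  · simp [PySem.Set.empty]

theorem mem_cellA_iff (Lx Ly : Int) (pbcx pbcy : Bool) (x y : Int) (e : Int × Int) :
    e ∈ cellA Lx Ly pbcx pbcy x y ↔
      ((x + 1 < Lx ∧ e = (x + Lx * y, x + 1 + Lx * y))
       ∨ (¬(x + 1 < Lx) ∧ (pbcx && decide (Lx > 1)) = true ∧ e = (0 + Lx * y, x + Lx * y))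
       ∨ (y + 1 < Ly ∧ e = (x + Lx * y, x + Lx * (y + 1)))
       ∨ (¬(y + 1 < Ly) ∧ (pbcy && decide (Ly > 1)) = true ∧ e = (x + Lx * 0, x + Lx * y))) := by
  by_cases hc1 : x + 1 < Lx <;> by_cases hc2 : (pbcx && decide (Lx > 1)) = true <;>
    by_cases hc3 : y + 1 < Ly <;> by_cases hc4 : (pbcy && decide (Ly > 1)) = true <;>
    simp [cellA, hc1, hc2, hc3, hc4]

theorem mem_cellB_iff (Lx Ly : Int) (pbcx pbcy : Bool) (i : Int) (e : Int × Int) :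
    e ∈ cellB Lx Ly pbcx pbcy i ↔
      ((i % Lx + 1 < Lx ∧ e = (i, i + 1))
       ∨ (((i % Lx == 0) && pbcx && decide (Lx > 2)) = true ∧ e = (i, i + Lx - 1))
       ∨ (i / Lx + 1 < Ly ∧ e = (i, i + Lx))
       ∨ (((i / Lx == 0) && pbcy && decide (Ly > 2)) = true ∧ e = (i, i + Lx * (Ly - 1)))) := by
  by_cases hc1 : i % Lx + 1 < Lx <;> by_cases hc2 : ((i % Lx == 0) && pbcx && decide (Lx > 2)) = true <;>
    by_cases hc3 : i / Lx + 1 < Ly <;> by_cases hc4 : ((i / Lx == 0) && pbcy && decide (Ly > 2)) = true <;>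
    simp [cellB, hc1, hc2, hc3, hc4]

theorem fst_of_mem_cellB {Lx Ly : Int} {pbcx pbcy : Bool} {i : Int} {e : Int × Int}
    (he : e ∈ cellB Lx Ly pbcx pbcy i) : e.1 = i := by
  rw [mem_cellB_iff] at he
  rcases he with ⟨_, rfl⟩ | ⟨_, rfl⟩ | ⟨_, rfl⟩ | ⟨_, rfl⟩ <;> rfl

theorem pairwise_cellB {Lx Ly : Int} (pbcx pbcy : Bool) (i : Int) (hLx : 0 < Lx) :
    (cellB Lx Ly pbcx pbcy i).Pairwise (fun a b => toLex a < toLex b) := by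
  have hx0 : 0 ≤ i % Lx := Int.emod_nonneg i (ne_of_gt hLx)
  unfold cellB
  split_ifs with h1 h2 h3 h4 <;>
    simp_all [List.pairwise_cons, Prod.Lex.toLex_lt_toLex] <;>
    (repeat' constructor) <;> (first | linarith | nlinarith)

theorem pairB {Lx Ly : Int} (pbcx pbcy : Bool) (hLx : 0 < Lx) :
    ((PySem.List.pyRange 0 (Lx * Ly) 1).flatMap (cellB Lx Ly pbcx pbcy)).Pairwise
      (fun a b => toLex a < toLex b) := by
  rw [List.flatMap_def, List.pairwise_flatten]
  constructor
  · intro l hl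
    rcases List.mem_map.mp hl with ⟨i, _, rfl⟩
    exact pairwise_cellB pbcx pbcy i hLx
  · rw [List.pairwise_map]
    refine (PySem.List.pairwise_lt_pyRange_one 0 (Lx * Ly)).imp ?_
    intro i j hij a ha b hb
    rw [Prod.Lex.toLex_lt_toLex]
    left
    rw [fst_of_mem_cellB ha, fst_of_mem_cellB hb]
    exact hij

-- B's loop equals the flatMap of cellB (fmod/fdiv agree with emod/ediv for a positive divisor).
theorem alt_eq_flatMap (Lx Ly : Int) (pbcx pbcy : Bool) (hLx : 0 < Lx) (hLy : 0 < Ly) :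
    lattice_edges_rect_alt Lx Ly pbcx pbcy
      = (PySem.List.pyRange 0 (Lx * Ly) 1).flatMap (cellB Lx Ly pbcx pbcy) := by
  unfold lattice_edges_rect_alt
  rw [if_neg (by omega)]
  have hmod : ∀ i : Int, PySem.Int.mod i Lx = i % Lx := by
    intro i
    show Int.fmod i Lx = i % Lx
    rw [Int.fmod_eq_emod, if_pos (Or.inl (le_of_lt hLx)), add_zero]
  have hdiv : ∀ i : Int, PySem.Int.floordiv i Lx = i / Lx := by
    intro i
    show Int.fdiv i Lx = i / Lx
    rw [Int.fdiv_eq_ediv, if_pos (Or.inl (le_of_lt hLx)), sub_zero]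
  rw [PySem.List.foldl_congr_mem _ _
    (fun edges i => edges ++ cellB Lx Ly pbcx pbcy i) _ ?_]
  · rw [PySem.List.foldl_append_eq_flatMap]
    simp
  · intro acc i _
    simp only [hmod, hdiv]
    unfold cellB
    split_ifs <;> simp [List.append_assoc]

-- The heart of the proof: A's per-cell edges and B's per-site edges cover the same set.
theorem main_iff (Lx Ly : Int) (pbcx pbcy : Bool) (hLx : 0 < Lx) (hLy : 0 < Ly) (e : Int × Int) :
    (∃ y ∈ PySem.List.pyRange 0 Ly 1, ∃ x ∈ PySem.List.pyRange 0 Lx 1,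
        e ∈ cellA Lx Ly pbcx pbcy x y)
    ↔ ∃ i ∈ PySem.List.pyRange 0 (Lx * Ly) 1, e ∈ cellB Lx Ly pbcx pbcy i := by
  have hLxne : Lx ≠ 0 := ne_of_gt hLx
  constructor
  · rintro ⟨y, hy, x, hx, he⟩
    rw [PySem.List.mem_pyRange_one] at hy hx
    obtain ⟨hy0, hyL⟩ := hy
    obtain ⟨hx0, hxL⟩ := hx
    have hmn : 0 ≤ Lx * y := mul_nonneg (le_of_lt hLx) hy0
    have hstep : Lx * (y + 1) = Lx * y + Lx := by ring
    have hbnd : Lx * (y + 1) ≤ Lx * Ly := mul_le_mul_of_nonneg_left (by linarith) (le_of_lt hLx)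
    have hxyN : x + Lx * y < Lx * Ly := by linarith
    have hmod : (x + Lx * y) % Lx = x := by
      rw [Int.add_mul_emod_self_left, Int.emod_eq_of_lt hx0 hxL]
    have hdiv : (x + Lx * y) / Lx = y := by
      rw [Int.add_mul_ediv_left _ _ hLxne, Int.ediv_eq_zero_of_lt hx0 hxL, zero_add]
    rw [mem_cellA_iff] at he
    rcases he with ⟨h, rfl⟩ | ⟨hnx, hbc, rfl⟩ | ⟨h, rfl⟩ | ⟨hny, hbc, rfl⟩
    · refine ⟨x + Lx * y, PySem.List.mem_pyRange_one.mpr ⟨by linarith, hxyN⟩, ?_⟩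
      rw [mem_cellB_iff]
      exact Or.inl ⟨by rw [hmod]; exact h,
        by rw [show x + 1 + Lx * y = x + Lx * y + 1 from by ring]⟩
    · simp only [Bool.and_eq_true, decide_eq_true_eq] at hbc
      have hxeq : x = Lx - 1 := by omega
      rcases (by omega : Lx = 2 ∨ 2 < Lx) with h2 | h2
      · refine ⟨Lx * y, PySem.List.mem_pyRange_one.mpr ⟨hmn, by linarith⟩, ?_⟩
        rw [mem_cellB_iff]
        refine Or.inl ⟨?_, ?_⟩
        · rw [Int.mul_emod_right]; omega
        · simp only [Prod.mk.injEq]; constructor <;> linarith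
      · refine ⟨Lx * y, PySem.List.mem_pyRange_one.mpr ⟨hmn, by linarith⟩, ?_⟩
        rw [mem_cellB_iff]
        refine Or.inr (Or.inl ⟨?_, ?_⟩)
        · simp only [Bool.and_eq_true, beq_iff_eq, decide_eq_true_eq]
          exact ⟨⟨Int.mul_emod_right Lx y, hbc.1⟩, h2⟩
        · simp only [Prod.mk.injEq]; constructor <;> linarith
    · refine ⟨x + Lx * y, PySem.List.mem_pyRange_one.mpr ⟨by linarith, hxyN⟩, ?_⟩
      rw [mem_cellB_iff]
      refine Or.inr (Or.inr (Or.inl ⟨?_, ?_⟩))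
      · rw [hdiv]; exact h
      · rw [show x + Lx * (y + 1) = x + Lx * y + Lx from by ring]
    · simp only [Bool.and_eq_true, decide_eq_true_eq] at hbc
      have hyeq : y = Ly - 1 := by omega
      have hz : Lx * 0 = 0 := by ring
      have hone : Lx * 1 ≤ Lx * Ly := mul_le_mul_of_nonneg_left (by omega) (le_of_lt hLx)
      have hdx : x / Lx = 0 := Int.ediv_eq_zero_of_lt hx0 hxL
      have hwrap : Lx * (Ly - 1) = Lx * Ly - Lx := by ring
      have hsub : Lx * y = Lx * (Ly - 1) := by rw [hyeq]
      rcases (by omega : Ly = 2 ∨ 2 < Ly) with h2 | h2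
      · refine ⟨x, PySem.List.mem_pyRange_one.mpr ⟨hx0, by linarith⟩, ?_⟩
        rw [mem_cellB_iff]
        refine Or.inr (Or.inr (Or.inl ⟨?_, ?_⟩))
        · rw [hdx]; omega
        · rw [show x + Lx * 0 = x from by ring,
              show x + Lx * y = x + Lx from by rw [hyeq, h2]; ring]
      · refine ⟨x, PySem.List.mem_pyRange_one.mpr ⟨hx0, by linarith⟩, ?_⟩
        rw [mem_cellB_iff]
        refine Or.inr (Or.inr (Or.inr ⟨?_, ?_⟩))
        · simp only [Bool.and_eq_true, beq_iff_eq, decide_eq_true_eq]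
          exact ⟨⟨hdx, hbc.1⟩, h2⟩
        · simp only [Prod.mk.injEq]; constructor <;> linarith
  · rintro ⟨i, hi, he⟩
    rw [PySem.List.mem_pyRange_one] at hi
    obtain ⟨hi0, hiN⟩ := hi
    have hx0 : 0 ≤ i % Lx := Int.emod_nonneg i hLxne
    have hxL : i % Lx < Lx := Int.emod_lt_of_pos i hLx
    have hid : i % Lx + Lx * (i / Lx) = i := Int.emod_add_ediv i Lx
    have hy0 : 0 ≤ i / Lx := Int.ediv_nonneg hi0 (le_of_lt hLx)
    have hyL : i / Lx < Ly := (Int.ediv_lt_iff_lt_mul hLx).mpr (by rw [mul_comm]; exact hiN)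
    rw [mem_cellB_iff] at he
    rcases he with ⟨h, rfl⟩ | ⟨hb, rfl⟩ | ⟨h, rfl⟩ | ⟨hb, rfl⟩
    · refine ⟨i / Lx, PySem.List.mem_pyRange_one.mpr ⟨hy0, hyL⟩,
        i % Lx, PySem.List.mem_pyRange_one.mpr ⟨hx0, hxL⟩, ?_⟩
      rw [mem_cellA_iff]
      exact Or.inl ⟨h, by simp only [Prod.mk.injEq]; constructor <;> linarith⟩
    · simp only [Bool.and_eq_true, beq_iff_eq, decide_eq_true_eq] at hb
      obtain ⟨⟨hm0, hpx⟩, h2⟩ := hb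
      have hdvd : Lx * (i / Lx) = i := by linarith [hid, hm0]
      refine ⟨i / Lx, PySem.List.mem_pyRange_one.mpr ⟨hy0, hyL⟩,
        Lx - 1, PySem.List.mem_pyRange_one.mpr ⟨by omega, by omega⟩, ?_⟩
      rw [mem_cellA_iff]
      refine Or.inr (Or.inl ⟨by omega, ?_, ?_⟩)
      · simp only [Bool.and_eq_true, decide_eq_true_eq]
        exact ⟨hpx, by omega⟩
      · simp only [Prod.mk.injEq]; constructor <;> linarith
    · refine ⟨i / Lx, PySem.List.mem_pyRange_one.mpr ⟨hy0, hyL⟩,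
        i % Lx, PySem.List.mem_pyRange_one.mpr ⟨hx0, hxL⟩, ?_⟩
      rw [mem_cellA_iff]
      have hstep : Lx * (i / Lx + 1) = Lx * (i / Lx) + Lx := by ring
      refine Or.inr (Or.inr (Or.inl ⟨h, ?_⟩))
      simp only [Prod.mk.injEq]; constructor <;> linarith
    · simp only [Bool.and_eq_true, beq_iff_eq, decide_eq_true_eq] at hb
      obtain ⟨⟨hd0, hpy⟩, h2⟩ := hb
      have hz : Lx * (0 : Int) = 0 := by ring
      have hieq : i % Lx = i := by rw [hd0] at hid; linarith
      have hiL : i < Lx := by linarith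
      have hsub : Lx * (Ly - 1 + 1) = Lx * Ly := by ring
      refine ⟨Ly - 1, PySem.List.mem_pyRange_one.mpr ⟨by omega, by omega⟩,
        i, PySem.List.mem_pyRange_one.mpr ⟨hi0, hiL⟩, ?_⟩
      rw [mem_cellA_iff]
      refine Or.inr (Or.inr (Or.inr ⟨by omega, ?_, ?_⟩))
      · simp only [Bool.and_eq_true, decide_eq_true_eq]
        exact ⟨hpy, by omega⟩
      · rw [show i + Lx * 0 = i from by ring]

theorem foldl_const {γ : Type} : ∀ (l : List Int) (s : List γ),
    List.foldl (fun s (_ : Int) => s) s l = s := by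
  intro l
  induction l with
  | nil => intro s; rfl
  | cons b l ih => intro s; simpa using ih s

-- ===== VERDICT =====
theorem lattice_edges_rect_spec : Claim_equal_lattice_edges_rect := by
  intro Lx Ly pbcx pbcy _
  unfold Spec_lattice_edges_rect
  by_cases hdeg : Lx ≤ 0 ∨ Ly ≤ 0
  · rw [portA_eq]
    unfold lattice_edges_rect_alt
    rw [if_pos hdeg, (PySem.List.sorted_eq_nil_iff _ _ _)]
    unfold edgesA
    rcases hdeg with h | h
    · simp only [PySem.List.pyRange_one_eq_nil h, List.foldl_nil]
      rw [foldl_const]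
      rfl
    · simp only [PySem.List.pyRange_one_eq_nil h, List.foldl_nil]
      rfl
  · have hLx : 0 < Lx := by omega
    have hLy : 0 < Ly := by omega
    rw [portA_eq, alt_eq_flatMap Lx Ly pbcx pbcy hLx hLy]
    apply PySem.List.sorted_eq_of_perm_of_pairwise_lt
    · refine (List.perm_ext_iff_of_nodup ?_ (nodup_edgesA Lx Ly pbcx pbcy)).mpr ?_
      · exact (pairB pbcx pbcy hLx).imp fun h heq => absurd (heq ▸ h) (lt_irrefl _)
      · intro a
        rw [mem_edgesA, main_iff Lx Ly pbcx pbcy hLx hLy, List.mem_flatMap]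
    · exact pairB pbcx pbcy hLx
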